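-- pv_equiv track=rewrite | github.com/nickbutler25/FPLOptimizer | backend/app/services/expected_points_service.py | _get_next_event
-- ===== SOURCE A (Python) =====
-- from typing import Dict, List, Optional
--
-- def _get_next_event(events_data: List[Dict]) -> Optional[Dict]:
--     """Get the next upcoming gameweek.
--
--     Args:
--         events_data: List of gameweek events
--
--     Returns:
--         Next event data or None
--     """
--     for event in events_data:
--         if event.get("is_next"):
--             return event
--
--     # Fallback: find first event that hasn't finished
--     for event in events_data:
--         if not event.get("finished"):
--             return event
--
--     return None
-- ===== SOURCE B (Python) =====
-- from typing import Dict, List, Optional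
--
-- def _get_next_event(events_data: List[Dict]) -> Optional[Dict]:
--     """Single pass: return the is_next event immediately; remember the first
--     not-finished event as a fallback returned only after the full scan."""
--     fallback = None
--     for event in events_data:
--         if event.get("is_next"):
--             return event
--         if fallback is None and not event.get("finished"):
--             fallback = event
--     return fallback
-- ===== Notes on version B (the rewrite author's own statement) =====
-- stated objective: simpler
-- what changed: Replaced A's two sequential scans with a single pass that returns an is_next event immediately and maintains the first not-finished event as a fallback.
import Mathlib
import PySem

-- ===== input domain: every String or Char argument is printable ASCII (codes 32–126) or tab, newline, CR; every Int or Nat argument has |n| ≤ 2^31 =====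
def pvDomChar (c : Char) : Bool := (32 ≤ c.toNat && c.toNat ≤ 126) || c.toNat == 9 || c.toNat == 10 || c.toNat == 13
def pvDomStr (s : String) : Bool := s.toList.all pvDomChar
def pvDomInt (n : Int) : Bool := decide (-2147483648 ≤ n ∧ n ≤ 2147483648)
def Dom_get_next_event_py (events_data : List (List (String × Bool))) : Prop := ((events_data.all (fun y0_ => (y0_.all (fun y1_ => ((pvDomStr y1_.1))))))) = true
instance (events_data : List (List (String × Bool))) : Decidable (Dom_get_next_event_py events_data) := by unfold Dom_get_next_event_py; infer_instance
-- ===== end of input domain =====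

-- B collapses A's two sequential scans into one pass carrying a fallback candidate; objective: simpler.

-- ===== PORT A =====
-- event.get(k): first-match lookup in the association list, default False (truthiness of None/False)
def pvEvGet (event : List (String × Bool)) (k : String) : Bool :=
  ((PySem.Dict.mk event).get? k).getD false

-- first for-loop of A: return first event with is_next
def pvScanNext : List (List (String × Bool)) → Option (List (String × Bool))
  | [] => none
  | e :: rest => if pvEvGet e "is_next" then some e else pvScanNext rest

-- second for-loop of A: first event that is not finished
def pvScanUnfinished : List (List (String × Bool)) → Option (List (String × Bool))
  | [] => none
  | e :: rest => if !pvEvGet e "finished" then some e else pvScanUnfinished rest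

def get_next_event_py (events_data : List (List (String × Bool))) : Option (List (String × Bool)) :=
  match pvScanNext events_data with
  | some e => some e
  | none => pvScanUnfinished events_data

-- ===== PORT B =====
-- B's single loop with the fallback accumulator
def pvAltLoop : List (List (String × Bool)) → Option (List (String × Bool)) → Option (List (String × Bool))
  | [], fb => fb
  | e :: rest, fb =>
      if pvEvGet e "is_next" then some e
      else pvAltLoop rest (if fb.isNone && !pvEvGet e "finished" then some e else fb)

def get_next_event_py_alt (events_data : List (List (String × Bool))) : Option (List (String × Bool)) :=
  pvAltLoop events_data none

-- ===== PRECONDITION & SPEC =====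
def Spec_get_next_event_py (events_data : List (List (String × Bool))) (out : Option (List (String × Bool))) : Prop := out = get_next_event_py_alt events_data
instance (events_data : List (List (String × Bool))) (out : Option (List (String × Bool))) : Decidable (Spec_get_next_event_py events_data out) := by unfold Spec_get_next_event_py; infer_instance

-- ===== CLAIM (what is proved, stated in full; the proofs are below) =====
def Claim_equal_get_next_event_py : Prop := ∀ (events_data : List (List (String × Bool))), Dom_get_next_event_py events_data → Spec_get_next_event_py events_data (get_next_event_py events_data)

-- ===== LEMMAS AND PROOFS =====
-- loop invariant: B's single pass equals A's first scan, falling back to fb, then A's second scan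
theorem pvAltLoop_eq (evs : List (List (String × Bool))) (fb : Option (List (String × Bool))) :
    pvAltLoop evs fb =
      ((pvScanNext evs).orElse (fun _ => fb.orElse (fun _ => pvScanUnfinished evs))) := by
  induction evs generalizing fb with
  | nil => simp [pvAltLoop, pvScanNext, pvScanUnfinished]
  | cons e rest ih =>
    simp only [pvAltLoop, pvScanNext, pvScanUnfinished]
    by_cases hn : pvEvGet e "is_next" = true
    · simp [hn, Option.orElse]
    · simp only [hn, Bool.false_eq_true, ite_false, ih]
      cases fb with
      | some x => simp [Option.orElse]
      | none =>
        by_cases hf : pvEvGet e "finished" = true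
        · simp [hf, Option.orElse]
        · simp [hf, Option.orElse]

-- ===== VERDICT (by name: the statement is the Claim_ definition above) =====
theorem get_next_event_py_spec : Claim_equal_get_next_event_py := by
  intro evs _
  unfold Spec_get_next_event_py get_next_event_py get_next_event_py_alt
  rw [pvAltLoop_eq]
  cases h : pvScanNext evs <;> simp [Option.orElse]
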